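-- pv_equiv track=rewrite | github.com/JYKai/python_skills | coding_problem/problem_list1/10_dp/55_단어퍼즐/12983.py | solution
-- ===== SOURCE A (Python) =====
-- def solution(strs, t):
--     n = len(t) # 타겟 문자열의 길이
--     dp = [float('inf')] * (n + 1) # 각 위치에서 필요한 최소 조각수를 저장할 배열
--
--     dp[0] = 0 # 빈 문자열을 위해 필요한 최소 조각수는 0
--     sizes = set(len(s) for s in strs) # strs 조각들의 길이를 저장한 집합
--
--     for i in range(1, n + 1): # dp[i]부터 dp[n]까지 채우기 위한 반복문
--         for size in sizes: # 각 str 조각의 문자열 길이에 대하여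
--             if (i - size >= 0 and t[i - size: i] in strs): # 이미 구한 해와 strs 조각을 추가해서 문자열을 만들 수 있다면
--                 dp[i] = min(dp[i], dp[i - size] + 1) # 해당 위치의 최소 조각수를 갱신
--
--     return dp[n] if dp[n] < float('inf') else -1
-- ===== SOURCE B (Python) =====
-- def solution(strs, t):
--     # BFS over positions 0..n: queue-by-levels with a visited set; depth at which n first appears is the answer.
--     n = len(t)
--     pieces = set(strs)
--     sizes = set(len(s) for s in pieces)
--     visited = {0}
--     frontier = {0}
--     for used in range(n + 1):
--         if n in frontier:
--             return used
--         nxt = set()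
--         for i in frontier:
--             for size in sizes:
--                 j = i + size
--                 if j <= n and j not in visited and t[i:j] in pieces:
--                     visited.add(j)
--                     nxt.add(j)
--         frontier = nxt
--     return -1
-- ===== Notes on version B (the rewrite author's own statement) =====
-- stated objective: faster
-- what changed: Replaces the left-to-right dp-array fill with a breadth-first traversal of positions 0..n using frontier/visited sets, returning at the first level that reaches position n instead of filling the whole table and reading dp[n].
import Mathlib
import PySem

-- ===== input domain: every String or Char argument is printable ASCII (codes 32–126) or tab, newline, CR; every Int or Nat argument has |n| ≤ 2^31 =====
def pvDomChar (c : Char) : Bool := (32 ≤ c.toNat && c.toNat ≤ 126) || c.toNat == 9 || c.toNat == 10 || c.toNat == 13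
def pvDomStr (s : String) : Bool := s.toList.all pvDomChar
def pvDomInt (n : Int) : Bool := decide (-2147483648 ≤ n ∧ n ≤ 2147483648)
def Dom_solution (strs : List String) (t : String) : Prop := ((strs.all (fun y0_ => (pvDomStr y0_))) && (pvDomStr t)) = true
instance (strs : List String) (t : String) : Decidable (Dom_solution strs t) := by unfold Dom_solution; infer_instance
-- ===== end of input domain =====

-- B replaces A's left-to-right dp-array fill by a level-by-level BFS over positions 0..n with
-- frontier/visited sets and an early exit (measurably faster: it only explores reachable
-- positions and stops at the answer's level); the return value is proved equal on all inputs.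

-- ===== PORT A =====
-- Python's float('inf') dp entries are ported as `none : Option Nat`; `omin`/`osucc` mirror
-- Python's min / +1 exactly on the values A ever stores (non-negative ints and inf).
def omin : Option Nat → Option Nat → Option Nat
  | none, b => b
  | some a, none => some a
  | some a, some b => some (min a b)

def osucc (o : Option Nat) : Option Nat := o.map (· + 1)

-- A's inner loop: `for size in sizes: if i - size >= 0 and t[i-size:i] in strs: dp[i] = min(dp[i], dp[i-size]+1)`.
-- Indices are non-negative throughout, so they are kept as Nat; `size ≤ i` is Python's `i - size >= 0`;
-- the slice t[i-size:i] is (cs.drop (i-size)).take size; strings are compared as their char lists.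
def innerA (pieces : List (List Char)) (cs : List Char) (i : Nat)
    (dp : List (Option Nat)) (sizes : List Nat) : List (Option Nat) :=
  sizes.foldl (fun dp size =>
    if size ≤ i ∧ ((cs.drop (i - size)).take size) ∈ pieces then
      dp.set i (omin (dp.getD i none) (osucc (dp.getD (i - size) none)))
    else dp) dp

def solution (strs : List String) (t : String) : Int :=
  let cs := t.toList
  let n := cs.length
  let pieces := strs.map String.toList
  -- dp = [float('inf')] * (n+1); dp[0] = 0
  let dp0 : List (Option Nat) := (some 0) :: List.replicate n none
  -- sizes = set(len(s) for s in strs)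
  let sizes : PySem.Set Nat := PySem.Set.ofList (pieces.map List.length)
  -- for i in range(1, n+1): for size in sizes: ...
  let dp := (List.range' 1 n).foldl (fun dp i => innerA pieces cs i dp sizes) dp0
  -- return dp[n] if dp[n] < float('inf') else -1
  match dp.getD n none with
  | some v => (v : Int)
  | none => -1

-- ===== PORT B =====
-- B's body for one frontier element i:
-- `for size in sizes: j = i + size; if j <= n and j not in visited and t[i:j] in pieces: visited.add(j); nxt.add(j)`
def bstep (pieces : List (List Char)) (sizes : List Nat) (cs : List Char) (n : Nat)
    (vn : List Nat × List Nat) (i : Nat) : List Nat × List Nat :=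
  sizes.foldl (fun vn size =>
    let j := i + size
    if j ≤ n ∧ j ∉ vn.1 ∧ ((cs.drop i).take size) ∈ pieces then
      (PySem.Set.add vn.1 j, PySem.Set.add vn.2 j)
    else vn) vn

-- B's `for used in range(n+1):` with early `return used`; the fuel is the n+1 iterations, then `return -1`.
def bfsB (pieces : List (List Char)) (sizes : List Nat) (cs : List Char) (n : Nat) :
    Nat → List Nat → List Nat → Nat → Int
  | 0, _, _, _ => -1
  | fuel + 1, visited, frontier, used =>
    if n ∈ frontier then (used : Int)
    else
      let vn := frontier.foldl (bstep pieces sizes cs n) (visited, ([] : List Nat))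
      bfsB pieces sizes cs n fuel vn.1 vn.2 (used + 1)

def solution_alt (strs : List String) (t : String) : Int :=
  let cs := t.toList
  let n := cs.length
  -- pieces = set(strs); sizes = set(len(s) for s in pieces)
  let pieces : PySem.Set (List Char) := PySem.Set.ofList (strs.map String.toList)
  let sizes : PySem.Set Nat := PySem.Set.ofList (pieces.map List.length)
  -- visited = {0}; frontier = {0}
  bfsB pieces sizes cs n (n + 1) [0] [0] 0

-- ===== PRECONDITION & SPEC =====
def Spec_solution (strs : List String) (t : String) (out : Int) : Prop := out = solution_alt strs t
instance (strs : List String) (t : String) (out : Int) : Decidable (Spec_solution strs t out) := by unfold Spec_solution; infer_instance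

-- ===== CLAIM (what is proved, stated in full; the proofs are below) =====
def Claim_equal_solution : Prop := ∀ (strs : List String) (t : String), Dom_solution strs t → Spec_solution strs t (solution strs t)

-- ===== LEMMAS AND PROOFS =====

-- An edge i → j of the position graph: the nonempty piece t[i:j] is available.
def Edge (pieces : List (List Char)) (cs : List Char) (i j : Nat) : Prop :=
  i < j ∧ j ≤ cs.length ∧ ((cs.drop i).take (j - i)) ∈ pieces

-- Reach k j: position j is reachable from 0 using exactly k pieces.
inductive Reach (pieces : List (List Char)) (cs : List Char) : Nat → Nat → Prop
  | zero : Reach pieces cs 0 0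
  | succ {k i j} : Reach pieces cs k i → Edge pieces cs i j → Reach pieces cs (k + 1) j

-- o is the minimum piece count reaching j (none = unreachable).
def MinR (pieces : List (List Char)) (cs : List Char) (j : Nat) : Option Nat → Prop
  | some k => Reach pieces cs k j ∧ ∀ k', Reach pieces cs k' j → k ≤ k'
  | none => ∀ k, ¬ Reach pieces cs k j

-- option-order: `ole a b` means a ≤ b where none = +inf
def ole (a b : Option Nat) : Prop := ∀ v, b = some v → ∃ u, a = some u ∧ u ≤ v

theorem ole_trans {a b c : Option Nat} (h1 : ole a b) (h2 : ole b c) : ole a c := by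
  intro v hv
  obtain ⟨u, hu, huv⟩ := h2 v hv
  obtain ⟨w, hw, hwu⟩ := h1 u hu
  exact ⟨w, hw, le_trans hwu huv⟩

theorem ole_refl (a : Option Nat) : ole a a := fun v hv => ⟨v, hv, le_rfl⟩

theorem omin_ole_left (a b : Option Nat) : ole (omin a b) a := by
  cases a <;> cases b <;> simp [omin, ole] <;> omega

theorem omin_ole_right (a b : Option Nat) : ole (omin a b) b := by
  cases a <;> cases b <;> simp [omin, ole] <;> omega

theorem omin_eq_or (a b : Option Nat) : omin a b = a ∨ omin a b = b := by
  cases a <;> cases b <;> simp [omin] <;> omega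

theorem omin_osucc_self (a : Option Nat) : omin a (osucc a) = a := by
  cases a <;> simp [omin, osucc]

theorem reach_le {pieces cs k j} (h : Reach pieces cs k j) : k ≤ j := by
  induction h with
  | zero => exact le_rfl
  | succ _ he ih => have := he.1; omega

theorem reach_le_len {pieces cs k j} (h : Reach pieces cs k j) : j ≤ cs.length := by
  cases h with
  | zero => exact Nat.zero_le _
  | succ _ he => exact he.2.1

theorem reach_zero_iff {pieces cs x} : Reach pieces cs 0 x ↔ x = 0 := by
  constructor
  · intro h; cases h; rfl
  · rintro rfl; exact Reach.zero

theorem minr_zero (pieces cs) : MinR pieces cs 0 (some 0) :=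
  ⟨Reach.zero, fun _ _ => Nat.zero_le _⟩


-- getD/set helpers
theorem getD_set_self {α} (l : List α) (i : Nat) (a d : α) (h : i < l.length) :
    (l.set i a).getD i d = a := by
  simp [List.getD_eq_getElem?_getD, List.getElem?_set_self, h]

theorem getD_set_ne {α} (l : List α) (i j : Nat) (a d : α) (h : j ≠ i) :
    (l.set i a).getD j d = l.getD j d := by
  simp [List.getD_eq_getElem?_getD, List.getElem?_set_ne (Ne.symm h)]

-- the abstract min-fold computed at index i, reading predecessors through r
def foldCand (pieces : List (List Char)) (cs : List Char) (i : Nat) (r : Nat → Option Nat)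
    (L : List Nat) (init : Option Nat) : Option Nat :=
  L.foldl (fun acc size =>
    if 1 ≤ size ∧ size ≤ i ∧ ((cs.drop (i - size)).take size) ∈ pieces then
      omin acc (osucc (r (i - size)))
    else acc) init

theorem foldCand_ole_init (pieces cs i r) : ∀ (L : List Nat) init,
    ole (foldCand pieces cs i r L init) init := by
  intro L
  induction L with
  | nil => intro init; exact ole_refl _
  | cons x xs ih =>
    intro init
    simp only [foldCand, List.foldl_cons]
    split
    · exact ole_trans (ih _) (omin_ole_left _ _)
    · exact ih _

theorem foldCand_ole_cand (pieces cs i r) : ∀ (L : List Nat) init (s : Nat), s ∈ L →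
    (1 ≤ s ∧ s ≤ i ∧ ((cs.drop (i - s)).take s) ∈ pieces) →
    ole (foldCand pieces cs i r L init) (osucc (r (i - s))) := by
  intro L
  induction L with
  | nil => intro _ s hs; simp at hs
  | cons x xs ih =>
    intro init s hs hc
    rcases List.mem_cons.mp hs with rfl | hs'
    · simp only [foldCand, List.foldl_cons, if_pos hc]
      exact ole_trans (foldCand_ole_init pieces cs i r xs _) (omin_ole_right _ _)
    · simp only [foldCand, List.foldl_cons]
      split
      · exact ih _ s hs' hc
      · exact ih _ s hs' hc

theorem foldCand_cases (pieces cs i r) : ∀ (L : List Nat) init,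
    foldCand pieces cs i r L init = init ∨
    ∃ s ∈ L, (1 ≤ s ∧ s ≤ i ∧ ((cs.drop (i - s)).take s) ∈ pieces) ∧
      foldCand pieces cs i r L init = osucc (r (i - s)) := by
  intro L
  induction L with
  | nil => intro init; left; rfl
  | cons x xs ih =>
    intro init
    simp only [foldCand, List.foldl_cons]
    by_cases hc : 1 ≤ x ∧ x ≤ i ∧ ((cs.drop (i - x)).take x) ∈ pieces
    · rw [if_pos hc]
      rcases ih (omin init (osucc (r (i - x)))) with h | ⟨s, hs, hcs, hr⟩
      · rcases omin_eq_or init (osucc (r (i - x))) with ho | ho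
        · left; exact h.trans ho
        · right; exact ⟨x, List.mem_cons_self, hc, h.trans ho⟩
      · right; exact ⟨s, List.mem_cons_of_mem _ hs, hcs, hr⟩
    · rw [if_neg hc]
      rcases ih init with h | ⟨s, hs, hcs, hr⟩
      · left; exact h
      · right; exact ⟨s, List.mem_cons_of_mem _ hs, hcs, hr⟩

-- innerA computes foldCand at index i and changes nothing else
theorem innerA_spec (pieces : List (List Char)) (cs : List Char) (i : Nat) (r : Nat → Option Nat) :
    ∀ (sizes : List Nat) (dp : List (Option Nat)), i < dp.length →
    (∀ j, j ≠ i → dp.getD j none = r j) →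
    (innerA pieces cs i dp sizes).getD i none
        = foldCand pieces cs i r sizes (dp.getD i none)
      ∧ (innerA pieces cs i dp sizes).length = dp.length
      ∧ ∀ j, j ≠ i → (innerA pieces cs i dp sizes).getD j none = r j := by
  intro sizes
  induction sizes with
  | nil => intro dp h hr; exact ⟨rfl, rfl, hr⟩
  | cons x xs ih =>
    intro dp hlen hr
    have hinner : innerA pieces cs i dp (x :: xs)
        = innerA pieces cs i
            (if x ≤ i ∧ ((cs.drop (i - x)).take x) ∈ pieces then
              dp.set i (omin (dp.getD i none) (osucc (dp.getD (i - x) none)))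
            else dp) xs := rfl
    have hfold : ∀ init, foldCand pieces cs i r (x :: xs) init
        = foldCand pieces cs i r xs
            (if 1 ≤ x ∧ x ≤ i ∧ ((cs.drop (i - x)).take x) ∈ pieces then
              omin init (osucc (r (i - x)))
            else init) := fun _ => rfl
    rw [hinner, hfold]
    by_cases hc : x ≤ i ∧ ((cs.drop (i - x)).take x) ∈ pieces
    · rw [if_pos hc]
      by_cases hx0 : x = 0
      · -- size 0: the update writes back the current value
        subst hx0
        have hval : omin (dp.getD i none) (osucc (dp.getD (i - 0) none)) = dp.getD i none := by
          rw [show i - 0 = i from rfl, omin_osucc_self]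
        rw [hval]
        have hlen' : i < (dp.set i (dp.getD i none)).length := by simpa using hlen
        have hr' : ∀ j, j ≠ i → (dp.set i (dp.getD i none)).getD j none = r j := by
          intro j hj; rw [getD_set_ne _ _ _ _ _ hj]; exact hr j hj
        obtain ⟨h1, h2, h3⟩ := ih (dp.set i (dp.getD i none)) hlen' hr'
        have hget' : (dp.set i (dp.getD i none)).getD i none = dp.getD i none :=
          getD_set_self _ _ _ _ hlen
        refine ⟨?_, ?_, h3⟩
        · rw [h1, hget', if_neg (by intro h; exact absurd h.1 (by omega))]
        · rw [h2, List.length_set]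
      · -- size ≥ 1: reads a strictly smaller index, which equals r
        have hx1 : 1 ≤ x := Nat.one_le_iff_ne_zero.mpr hx0
        have hne : i - x ≠ i := by omega
        have hread : dp.getD (i - x) none = r (i - x) := hr _ hne
        rw [if_pos ⟨hx1, hc.1, hc.2⟩, hread]
        set v := omin (dp.getD i none) (osucc (r (i - x))) with hv
        have hlen' : i < (dp.set i v).length := by simpa using hlen
        have hr' : ∀ j, j ≠ i → (dp.set i v).getD j none = r j := by
          intro j hj; rw [getD_set_ne _ _ _ _ _ hj]; exact hr j hj
        obtain ⟨h1, h2, h3⟩ := ih (dp.set i v) hlen' hr'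
        have hget' : (dp.set i v).getD i none = v := getD_set_self _ _ _ _ hlen
        exact ⟨by rw [h1, hget'], by rw [h2, List.length_set], h3⟩
    · rw [if_neg hc, if_neg (by intro h; exact hc ⟨h.2.1, h.2.2⟩)]
      exact ih dp hlen hr


-- the fold over sizes at index i computes the minimum over all incoming edges
theorem foldCand_minr (pieces : List (List Char)) (cs : List Char) (i : Nat) (r : Nat → Option Nat)
    (L : List Nat) (hi1 : 1 ≤ i) (hin : i ≤ cs.length)
    (hL : ∀ s : Nat, (∃ p ∈ pieces, p.length = s) → s ∈ L)
    (hr : ∀ a, a < i → MinR pieces cs a (r a)) :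
    MinR pieces cs i (foldCand pieces cs i r L none) := by
  have hedge : ∀ k, Reach pieces cs k i → ∃ u, foldCand pieces cs i r L none = some u ∧ u ≤ k := by
    intro k hk
    cases hk with
    | zero => exact absurd hi1 (by omega)
    | succ hka he =>
      rename_i k' a
      have ha : a < i := he.1
      have hmr := hr a ha
      cases hra : r a with
      | none => rw [hra] at hmr; exact absurd hka (hmr k')
      | some m =>
        rw [hra] at hmr
        have hm : m ≤ k' := hmr.2 k' hka
        have hia : i - (i - a) = a := by omega
        have hcond : 1 ≤ i - a ∧ i - a ≤ i ∧ ((cs.drop (i - (i - a))).take (i - a)) ∈ pieces := by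
          refine ⟨by omega, by omega, ?_⟩
          rw [hia]; exact he.2.2
        have hmem : (i - a) ∈ L := by
          refine hL _ ⟨(cs.drop a).take (i - a), he.2.2, ?_⟩
          simp [List.length_take, List.length_drop]
          omega
        have := foldCand_ole_cand pieces cs i r L none _ hmem hcond
        rw [hia, hra] at this
        obtain ⟨u, hu, hle⟩ := this (m + 1) rfl
        exact ⟨u, hu, by omega⟩
  cases ho : foldCand pieces cs i r L none with
  | none =>
    intro k hk
    obtain ⟨u, hu, _⟩ := hedge k hk
    rw [ho] at hu; cases hu
  | some u =>
    constructor
    · rcases foldCand_cases pieces cs i r L none with h | ⟨s, _, hcs, hval⟩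
      · rw [ho] at h; cases h
      · rw [ho] at hval
        cases hrs : r (i - s) with
        | none => rw [hrs] at hval; cases hval
        | some m =>
          rw [hrs] at hval
          have hum : u = m + 1 := by
            have := hval.symm
            simp [osucc] at this
            omega
          have hmr := hr (i - s) (by omega)
          rw [hrs] at hmr
          have hedge2 : Edge pieces cs (i - s) i := by
            refine ⟨by omega, hin, ?_⟩
            have : i - (i - s) = s := by omega
            rw [this]; exact hcs.2.2
          rw [hum]
          exact Reach.succ hmr.1 hedge2
    · intro k' hk'
      obtain ⟨u', hu', hle⟩ := hedge k' hk'
      rw [ho] at hu'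
      cases hu'
      exact hle

-- the dp list after the outer loop has processed i = 1..m
def dpA (pieces : List (List Char)) (cs : List Char) (sizes : List Nat) (m : Nat) : List (Option Nat) :=
  (List.range' 1 m).foldl (fun dp i => innerA pieces cs i dp sizes)
    ((some 0) :: List.replicate cs.length none)

theorem dp0_getD_pos (cs : List Char) (j : Nat) (hj : 1 ≤ j) :
    ((some 0 :: List.replicate cs.length (none : Option Nat)) : List (Option Nat)).getD j none = none := by
  cases j with
  | zero => omega
  | succ j' =>
    simp [List.getD_eq_getElem?_getD, List.getElem?_replicate]
    split <;> rfl

theorem dpA_inv (pieces : List (List Char)) (cs : List Char) (sizes : List Nat)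
    (hL : ∀ s : Nat, (∃ p ∈ pieces, p.length = s) → s ∈ sizes) :
    ∀ m, m ≤ cs.length →
      (dpA pieces cs sizes m).length = cs.length + 1
      ∧ (∀ j, j ≤ m → MinR pieces cs j ((dpA pieces cs sizes m).getD j none))
      ∧ (∀ j, m < j → (dpA pieces cs sizes m).getD j none = none) := by
  intro m
  induction m with
  | zero =>
    intro _
    refine ⟨by simp [dpA], ?_, ?_⟩
    · intro j hj
      interval_cases j
      exact minr_zero pieces cs
    · intro j hj
      exact dp0_getD_pos cs j hj
  | succ m ih =>
    intro hm
    obtain ⟨hlen, hmin, hnone⟩ := ih (by omega)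
    have hstep : dpA pieces cs sizes (m + 1) = innerA pieces cs (1 + m) (dpA pieces cs sizes m) sizes := by
      unfold dpA
      rw [List.range'_concat, List.foldl_append]
      simp
    have hi : (1 + m) < (dpA pieces cs sizes m).length := by omega
    obtain ⟨h1, h2, h3⟩ := innerA_spec pieces cs (1 + m) (fun j => (dpA pieces cs sizes m).getD j none)
      sizes (dpA pieces cs sizes m) hi (fun _ _ => rfl)
    have hcur : (dpA pieces cs sizes m).getD (1 + m) none = none := hnone _ (by omega)
    rw [hcur] at h1
    have hmr : MinR pieces cs (1 + m) ((dpA pieces cs sizes (m + 1)).getD (1 + m) none) := by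
      rw [hstep, h1]
      exact foldCand_minr pieces cs (1 + m) _ sizes (by omega) (by omega) hL
        (fun a ha => hmin a (by omega))
    refine ⟨by rw [hstep, h2, hlen], ?_, ?_⟩
    · intro j hj
      by_cases hji : j = 1 + m
      · rw [hji]; exact hmr
      · rw [hstep, h3 j hji]
        exact hmin j (by omega)
    · intro j hj
      have hji : j ≠ 1 + m := by omega
      rw [hstep, h3 j hji]
      exact hnone j (by omega)

theorem solution_eq (strs : List String) (t : String) :
    solution strs t =
      match (dpA (strs.map String.toList) t.toList
          (PySem.Set.ofList ((strs.map String.toList).map List.length)) t.toList.length).getD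
          t.toList.length none with
      | some v => (v : Int)
      | none => -1 := rfl


-- ===== B-side =====

def Qpred (pieces : List (List Char)) (cs : List Char) (i : Nat) (szs : List Nat) (x : Nat) : Prop :=
  ∃ s ∈ szs, x = i + s ∧ x ≤ cs.length ∧ ((cs.drop i).take s) ∈ pieces

-- membership after processing one frontier element's size loop
theorem bstep_fold_mem (pieces : List (List Char)) (cs : List Char) (i : Nat) :
    ∀ (szs : List Nat) (vn : List Nat × List Nat) (V N : Nat → Prop),
    (∀ x, x ∈ vn.1 ↔ V x) → (∀ x, x ∈ vn.2 ↔ N x) → (∀ x, N x → V x) →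
    (∀ x, x ∈ (szs.foldl (fun vn size =>
        if i + size ≤ cs.length ∧ i + size ∉ vn.1 ∧ ((cs.drop i).take size) ∈ pieces then
          (PySem.Set.add vn.1 (i + size), PySem.Set.add vn.2 (i + size))
        else vn) vn).1 ↔ V x ∨ Qpred pieces cs i szs x)
    ∧ (∀ x, x ∈ (szs.foldl (fun vn size =>
        if i + size ≤ cs.length ∧ i + size ∉ vn.1 ∧ ((cs.drop i).take size) ∈ pieces then
          (PySem.Set.add vn.1 (i + size), PySem.Set.add vn.2 (i + size))
        else vn) vn).2 ↔ N x ∨ (Qpred pieces cs i szs x ∧ ¬ V x)) := by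
  intro szs
  induction szs with
  | nil =>
    intro vn V N h1 h2 _
    refine ⟨fun x => ?_, fun x => ?_⟩
    · simp only [List.foldl_nil, Qpred]
      rw [h1]
      simp
    · simp only [List.foldl_nil, Qpred]
      rw [h2]
      simp
  | cons sz szs ih =>
    intro vn V N h1 h2 hNV
    simp only [List.foldl_cons]
    by_cases hg : i + sz ≤ cs.length ∧ i + sz ∉ vn.1 ∧ ((cs.drop i).take sz) ∈ pieces
    · rw [if_pos hg]
      have hnV : ¬ V (i + sz) := fun h => hg.2.1 ((h1 _).mpr h)
      have h1' : ∀ x, x ∈ PySem.Set.add vn.1 (i + sz) ↔ (V x ∨ x = i + sz) := by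
        intro x; rw [PySem.Set.mem_add, h1]
      have h2' : ∀ x, x ∈ PySem.Set.add vn.2 (i + sz) ↔ (N x ∨ x = i + sz) := by
        intro x; rw [PySem.Set.mem_add, h2]
      have hNV' : ∀ x, (N x ∨ x = i + sz) → (V x ∨ x = i + sz) := by
        rintro x (h | h)
        · exact Or.inl (hNV x h)
        · exact Or.inr h
      obtain ⟨g1, g2⟩ := ih (PySem.Set.add vn.1 (i + sz), PySem.Set.add vn.2 (i + sz)) _ _ h1' h2' hNV'
      constructor
      · intro x
        rw [g1 x]
        constructor
        · rintro ((hV | rfl) | hQ)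
          · exact Or.inl hV
          · exact Or.inr ⟨sz, List.mem_cons_self, rfl, hg.1, hg.2.2⟩
          · obtain ⟨s, hs, h⟩ := hQ
            exact Or.inr ⟨s, List.mem_cons_of_mem _ hs, h⟩
        · rintro (hV | ⟨s, hs, hx, hxe, hp⟩)
          · exact Or.inl (Or.inl hV)
          · rcases List.mem_cons.mp hs with rfl | hs'
            · exact Or.inl (Or.inr hx)
            · exact Or.inr ⟨s, hs', hx, hxe, hp⟩
      · intro x
        rw [g2 x]
        constructor
        · rintro ((hN | rfl) | ⟨hQ, hV'⟩)
          · exact Or.inl hN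
          · exact Or.inr ⟨⟨sz, List.mem_cons_self, rfl, hg.1, hg.2.2⟩, hnV⟩
          · obtain ⟨s, hs, h⟩ := hQ
            exact Or.inr ⟨⟨s, List.mem_cons_of_mem _ hs, h⟩, fun hv => hV' (Or.inl hv)⟩
        · rintro (hN | ⟨⟨s, hs, hx, hxe, hp⟩, hV⟩)
          · exact Or.inl (Or.inl hN)
          · rcases List.mem_cons.mp hs with rfl | hs'
            · exact Or.inl (Or.inr hx)
            · by_cases hxj : x = i + sz
              · exact Or.inl (Or.inr hxj)
              · exact Or.inr ⟨⟨s, hs', hx, hxe, hp⟩, by rintro (h | h); exact hV h; exact hxj h⟩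
    · rw [if_neg hg]
      obtain ⟨g1, g2⟩ := ih vn V N h1 h2 hNV
      have habs : ∀ x, (x = i + sz ∧ x ≤ cs.length ∧ ((cs.drop i).take sz) ∈ pieces) → V x := by
        rintro x ⟨rfl, hxe, hp⟩
        by_contra hv
        exact hg ⟨hxe, fun hmem => hv ((h1 _).mp hmem), hp⟩
      constructor
      · intro x
        rw [g1 x]
        constructor
        · rintro (hV | ⟨s, hs, h⟩)
          · exact Or.inl hV
          · exact Or.inr ⟨s, List.mem_cons_of_mem _ hs, h⟩
        · rintro (hV | ⟨s, hs, hx, hxe, hp⟩)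
          · exact Or.inl hV
          · rcases List.mem_cons.mp hs with rfl | hs'
            · exact Or.inl (habs x ⟨hx, hxe, hp⟩)
            · exact Or.inr ⟨s, hs', hx, hxe, hp⟩
      · intro x
        rw [g2 x]
        constructor
        · rintro (hN | ⟨⟨s, hs, h⟩, hV⟩)
          · exact Or.inl hN
          · exact Or.inr ⟨⟨s, List.mem_cons_of_mem _ hs, h⟩, hV⟩
        · rintro (hN | ⟨⟨s, hs, hx, hxe, hp⟩, hV⟩)
          · exact Or.inl hN
          · rcases List.mem_cons.mp hs with rfl | hs'
            · exact absurd (habs x ⟨hx, hxe, hp⟩) hV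
            · exact Or.inr ⟨⟨s, hs', hx, hxe, hp⟩, hV⟩

-- converting Qpred to edges, given the frontier element is already visited
theorem qpred_iff (pieces : List (List Char)) (cs : List Char) (sizes : List Nat)
    (hL : ∀ s : Nat, (∃ p ∈ pieces, p.length = s) → s ∈ sizes)
    (i : Nat) (x : Nat) :
    (Qpred pieces cs i sizes x → (Edge pieces cs i x ∨ x = i))
    ∧ (Edge pieces cs i x → Qpred pieces cs i sizes x) := by
  constructor
  · rintro ⟨s, hs, rfl, hxe, hp⟩
    rcases Nat.eq_zero_or_pos s with rfl | hs1
    · exact Or.inr rfl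
    · exact Or.inl ⟨by omega, hxe, by rw [show i + s - i = s by omega]; exact hp⟩
  · rintro ⟨hlt, hle, hp⟩
    refine ⟨x - i, hL _ ⟨(cs.drop i).take (x - i), hp, ?_⟩, by omega, hle, ?_⟩
    · simp [List.length_take, List.length_drop]; omega
    · exact hp


-- membership after folding bstep over the whole frontier
theorem frontier_fold_mem (pieces : List (List Char)) (cs : List Char) (sizes : List Nat)
    (hL : ∀ s : Nat, (∃ p ∈ pieces, p.length = s) → s ∈ sizes) :
    ∀ (F : List Nat) (vn : List Nat × List Nat) (V N : Nat → Prop),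
    (∀ x, x ∈ vn.1 ↔ V x) → (∀ x, x ∈ vn.2 ↔ N x) → (∀ x, N x → V x) →
    (∀ i, i ∈ F → (V i ∧ i ≤ cs.length)) →
    (∀ x, x ∈ (F.foldl (bstep pieces sizes cs cs.length) vn).1 ↔
        V x ∨ ∃ i ∈ F, Edge pieces cs i x)
    ∧ (∀ x, x ∈ (F.foldl (bstep pieces sizes cs cs.length) vn).2 ↔
        N x ∨ ((∃ i ∈ F, Edge pieces cs i x) ∧ ¬ V x)) := by
  intro F
  induction F with
  | nil =>
    intro vn V N h1 h2 _ _
    constructor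
    · intro x; simp only [List.foldl_nil]; rw [h1]; simp
    · intro x; simp only [List.foldl_nil]; rw [h2]; simp
  | cons i F ih =>
    intro vn V N h1 h2 hNV hF
    simp only [List.foldl_cons]
    have hVi : V i := (hF i List.mem_cons_self).1
    have hile : i ≤ cs.length := (hF i List.mem_cons_self).2
    obtain ⟨g1, g2⟩ := bstep_fold_mem pieces cs i sizes vn V N h1 h2 hNV
    -- bstep unfolds to the size fold
    have hb : bstep pieces sizes cs cs.length vn i = sizes.foldl (fun vn size =>
        if i + size ≤ cs.length ∧ i + size ∉ vn.1 ∧ ((cs.drop i).take size) ∈ pieces then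
          (PySem.Set.add vn.1 (i + size), PySem.Set.add vn.2 (i + size))
        else vn) vn := rfl
    -- convert Qpred to Edge-or-self, absorbing self into V
    have hQ1 : ∀ x, (V x ∨ Qpred pieces cs i sizes x) ↔ (V x ∨ Edge pieces cs i x) := by
      intro x
      constructor
      · rintro (hV | hQ)
        · exact Or.inl hV
        · rcases (qpred_iff pieces cs sizes hL i x).1 hQ with hE | rfl
          · exact Or.inr hE
          · exact Or.inl hVi
      · rintro (hV | hE)
        · exact Or.inl hV
        · exact Or.inr ((qpred_iff pieces cs sizes hL i x).2 hE)
    have h1' : ∀ x, x ∈ (bstep pieces sizes cs cs.length vn i).1 ↔ (V x ∨ Edge pieces cs i x) := by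
      intro x; rw [hb, g1, hQ1]
    have h2' : ∀ x, x ∈ (bstep pieces sizes cs cs.length vn i).2 ↔
        (N x ∨ (Edge pieces cs i x ∧ ¬ V x)) := by
      intro x
      rw [hb, g2]
      constructor
      · rintro (hN | ⟨hQ, hV⟩)
        · exact Or.inl hN
        · rcases (qpred_iff pieces cs sizes hL i x).1 hQ with hE | rfl
          · exact Or.inr ⟨hE, hV⟩
          · exact absurd hVi hV
      · rintro (hN | ⟨hE, hV⟩)
        · exact Or.inl hN
        · exact Or.inr ⟨(qpred_iff pieces cs sizes hL i x).2 hE, hV⟩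
    have hNV' : ∀ x, (N x ∨ (Edge pieces cs i x ∧ ¬ V x)) → (V x ∨ Edge pieces cs i x) := by
      rintro x (hN | ⟨hE, _⟩)
      · exact Or.inl (hNV x hN)
      · exact Or.inr hE
    have hF' : ∀ i', i' ∈ F → ((V i' ∨ Edge pieces cs i i') ∧ i' ≤ cs.length) := by
      intro i' hi'
      exact ⟨Or.inl (hF i' (List.mem_cons_of_mem _ hi')).1, (hF i' (List.mem_cons_of_mem _ hi')).2⟩
    obtain ⟨k1, k2⟩ := ih (bstep pieces sizes cs cs.length vn i)
      (fun x => V x ∨ Edge pieces cs i x) (fun x => N x ∨ (Edge pieces cs i x ∧ ¬ V x))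
      h1' h2' hNV' hF'
    constructor
    · intro x
      rw [k1]
      constructor
      · rintro ((hV | hE) | ⟨i', hi', hE⟩)
        · exact Or.inl hV
        · exact Or.inr ⟨i, List.mem_cons_self, hE⟩
        · exact Or.inr ⟨i', List.mem_cons_of_mem _ hi', hE⟩
      · rintro (hV | ⟨i', hi', hE⟩)
        · exact Or.inl (Or.inl hV)
        · rcases List.mem_cons.mp hi' with rfl | hi''
          · exact Or.inl (Or.inr hE)
          · exact Or.inr ⟨i', hi'', hE⟩
    · intro x
      rw [k2]
      constructor
      · rintro ((hN | ⟨hE, hV⟩) | ⟨⟨i', hi', hE⟩, hV'⟩)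
        · exact Or.inl hN
        · exact Or.inr ⟨⟨i, List.mem_cons_self, hE⟩, hV⟩
        · exact Or.inr ⟨⟨i', List.mem_cons_of_mem _ hi', hE⟩, fun hv => hV' (Or.inl hv)⟩
      · rintro (hN | ⟨⟨i', hi', hE⟩, hV⟩)
        · exact Or.inl (Or.inl hN)
        · rcases List.mem_cons.mp hi' with rfl | hi''
          · exact Or.inl (Or.inr ⟨hE, hV⟩)
          · by_cases hEi : Edge pieces cs i x
            · exact Or.inl (Or.inr ⟨hEi, hV⟩)
            · exact Or.inr ⟨⟨i', hi'', hE⟩, by rintro (h | h); exact hV h; exact hEi h⟩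

-- the BFS level invariant
def InvB (pieces : List (List Char)) (cs : List Char) (used : Nat)
    (visited frontier : List Nat) : Prop :=
  (∀ x, x ∈ visited ↔ ∃ m ≤ used, Reach pieces cs m x)
  ∧ (∀ x, x ∈ frontier ↔ (Reach pieces cs used x ∧ ∀ m < used, ¬ Reach pieces cs m x))

theorem invB_zero (pieces : List (List Char)) (cs : List Char) :
    InvB pieces cs 0 [0] [0] := by
  constructor
  · intro x
    simp only [List.mem_singleton]
    constructor
    · rintro rfl; exact ⟨0, le_rfl, Reach.zero⟩
    · rintro ⟨m, hm, hR⟩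
      interval_cases m
      exact (reach_zero_iff.mp hR)
  · intro x
    simp only [List.mem_singleton]
    constructor
    · rintro rfl; exact ⟨Reach.zero, fun m hm => by omega⟩
    · rintro ⟨hR, _⟩
      exact reach_zero_iff.mp hR

theorem invB_step (pieces : List (List Char)) (cs : List Char) (sizes : List Nat)
    (hL : ∀ s : Nat, (∃ p ∈ pieces, p.length = s) → s ∈ sizes)
    (used : Nat) (visited frontier : List Nat)
    (h : InvB pieces cs used visited frontier) :
    InvB pieces cs (used + 1)
      (frontier.foldl (bstep pieces sizes cs cs.length) (visited, ([] : List Nat))).1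
      (frontier.foldl (bstep pieces sizes cs cs.length) (visited, ([] : List Nat))).2 := by
  obtain ⟨hv, hf⟩ := h
  have hF : ∀ i, i ∈ frontier → ((∃ m ≤ used, Reach pieces cs m i) ∧ i ≤ cs.length) := by
    intro i hi
    have := (hf i).mp hi
    exact ⟨⟨used, le_rfl, this.1⟩, reach_le_len this.1⟩
  obtain ⟨g1, g2⟩ := frontier_fold_mem pieces cs sizes hL frontier (visited, ([] : List Nat))
    (fun x => ∃ m ≤ used, Reach pieces cs m x) (fun _ => False)
    hv (fun x => by simp) (fun x h => h.elim) hF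
  constructor
  · intro x
    rw [g1]
    constructor
    · rintro (⟨m, hm, hR⟩ | ⟨i, hi, hE⟩)
      · exact ⟨m, by omega, hR⟩
      · exact ⟨used + 1, le_rfl, Reach.succ ((hf i).mp hi).1 hE⟩
    · rintro ⟨m, hm, hR⟩
      by_cases hmu : m ≤ used
      · exact Or.inl ⟨m, hmu, hR⟩
      · have hm1 : m = used + 1 := by omega
        subst hm1
        cases hR with
        | succ hRa hE =>
          rename_i a
          by_cases hex : ∃ m' < used, Reach pieces cs m' a
          · obtain ⟨m', hm', hRa'⟩ := hex
            exact Or.inl ⟨m' + 1, by omega, Reach.succ hRa' hE⟩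
          · push_neg at hex
            exact Or.inr ⟨a, (hf a).mpr ⟨hRa, fun m' hm' => hex m' hm'⟩, hE⟩
  · intro x
    rw [g2]
    constructor
    · rintro (h | ⟨⟨i, hi, hE⟩, hV⟩)
      · exact h.elim
      · refine ⟨Reach.succ ((hf i).mp hi).1 hE, ?_⟩
        intro m hm hR
        exact hV ⟨m, by omega, hR⟩
    · rintro ⟨hR, hmin⟩
      cases hR with
      | succ hRa hE =>
        rename_i a
        by_cases hex : ∃ m' < used, Reach pieces cs m' a
        · obtain ⟨m', hm', hRa'⟩ := hex
          exact absurd (Reach.succ hRa' hE) (hmin (m' + 1) (by omega))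
        · push_neg at hex
          refine Or.inr ⟨⟨a, (hf a).mpr ⟨hRa, fun m' hm' => hex m' hm'⟩, hE⟩, ?_⟩
          rintro ⟨m, hm, hR'⟩
          exact hmin m (by omega) hR'

theorem bfsB_reaches (pieces : List (List Char)) (cs : List Char) (sizes : List Nat)
    (hL : ∀ s : Nat, (∃ p ∈ pieces, p.length = s) → s ∈ sizes) :
    ∀ (fuel used : Nat) (visited frontier : List Nat),
    InvB pieces cs used visited frontier →
    ∀ d, Reach pieces cs d cs.length → (∀ m < d, ¬ Reach pieces cs m cs.length) →
      used ≤ d → d < used + fuel →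
      bfsB pieces sizes cs cs.length fuel visited frontier used = (d : Int) := by
  intro fuel
  induction fuel with
  | zero => intro used _ _ _ d _ _ h1 h2; omega
  | succ fuel ih =>
    intro used visited frontier hInv d hR hmin hud hdf
    rw [bfsB]
    by_cases hd : d = used
    · subst hd
      rw [if_pos ((hInv.2 cs.length).mpr ⟨hR, hmin⟩)]
    · have hne : cs.length ∉ frontier := by
        intro hmem
        exact hmin used (by omega) ((hInv.2 cs.length).mp hmem).1
      rw [if_neg hne]
      exact ih (used + 1) _ _ (invB_step pieces cs sizes hL used visited frontier hInv)
        d hR hmin (by omega) (by omega)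

theorem bfsB_unreach (pieces : List (List Char)) (cs : List Char) (sizes : List Nat)
    (hL : ∀ s : Nat, (∃ p ∈ pieces, p.length = s) → s ∈ sizes) :
    ∀ (fuel used : Nat) (visited frontier : List Nat),
    InvB pieces cs used visited frontier →
    (∀ m, ¬ Reach pieces cs m cs.length) →
    bfsB pieces sizes cs cs.length fuel visited frontier used = -1 := by
  intro fuel
  induction fuel with
  | zero => intro used visited frontier _ _; rw [bfsB]
  | succ fuel ih =>
    intro used visited frontier hInv hno
    rw [bfsB]
    have hne : cs.length ∉ frontier := by
      intro hmem
      exact hno used ((hInv.2 cs.length).mp hmem).1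
    rw [if_neg hne]
    exact ih (used + 1) _ _ (invB_step pieces cs sizes hL used visited frontier hInv) hno

-- Reach only depends on the membership of pieces
theorem reach_congr {pieces pieces' : List (List Char)} {cs : List Char}
    (hmem : ∀ p, p ∈ pieces ↔ p ∈ pieces') :
    ∀ {k j}, Reach pieces cs k j → Reach pieces' cs k j := by
  intro k j h
  induction h with
  | zero => exact Reach.zero
  | succ _ he ih =>
    exact Reach.succ ih ⟨he.1, he.2.1, (hmem _).mp he.2.2⟩

theorem solution_alt_eq (strs : List String) (t : String) :
    solution_alt strs t =
      bfsB (PySem.Set.ofList (strs.map String.toList))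
        (PySem.Set.ofList ((PySem.Set.ofList (strs.map String.toList)).map List.length))
        t.toList (t.toList.length) (t.toList.length + 1) [0] [0] 0 := rfl

theorem solution_spec : Claim_equal_solution := by
  intro strs t _
  unfold Spec_solution
  classical
  set cs := t.toList with hcs
  set piecesA := strs.map String.toList with hpa
  set piecesB := PySem.Set.ofList (strs.map String.toList) with hpb
  have hmemBA : ∀ p : List Char, p ∈ piecesB ↔ p ∈ piecesA := fun p => PySem.Set.mem_ofList _ p
  have hRBA : ∀ k j, Reach piecesB cs k j ↔ Reach piecesA cs k j := fun k j =>
    ⟨reach_congr (fun p => hmemBA p), reach_congr (fun p => (hmemBA p).symm)⟩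
  have hLA : ∀ s : Nat, (∃ p ∈ piecesA, p.length = s) →
      s ∈ PySem.Set.ofList (piecesA.map List.length) := by
    rintro s ⟨p, hp, rfl⟩
    rw [PySem.Set.mem_ofList]
    exact List.mem_map_of_mem hp
  have hLB : ∀ s : Nat, (∃ p ∈ piecesB, p.length = s) →
      s ∈ PySem.Set.ofList (piecesB.map List.length) := by
    rintro s ⟨p, hp, rfl⟩
    rw [PySem.Set.mem_ofList]
    exact List.mem_map_of_mem hp
  obtain ⟨hlen, hmin, hnone⟩ := dpA_inv piecesA cs _ hLA cs.length le_rfl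
  have hA := hmin cs.length le_rfl
  rw [solution_eq, solution_alt_eq]
  by_cases hex : ∃ k, Reach piecesA cs k cs.length
  · have hd := Nat.find_spec hex
    have hmind : ∀ m, m < Nat.find hex → ¬ Reach piecesA cs m cs.length :=
      fun m hm => Nat.find_min hex hm
    have hB := bfsB_reaches piecesB cs _ hLB (cs.length + 1) 0 [0] [0] (invB_zero piecesB cs)
      (Nat.find hex) ((hRBA _ _).mpr hd)
      (fun m hm hr => hmind m hm ((hRBA _ _).mp hr)) (Nat.zero_le _)
      (by have := reach_le hd; omega)
    cases hv : (dpA piecesA cs (PySem.Set.ofList (piecesA.map List.length)) cs.length).getD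
        cs.length none with
    | none =>
      rw [hv] at hA
      exact absurd hd (hA _)
    | some k =>
      rw [hv] at hA
      have hk : k = Nat.find hex := le_antisymm (hA.2 _ hd) (Nat.find_min' hex hA.1)
      rw [hB]
      show (k : Int) = (Nat.find hex : Int)
      exact congrArg (fun m : Nat => (m : Int)) hk
  · have hno : ∀ m, ¬ Reach piecesB cs m cs.length :=
      fun m hr => hex ⟨m, (hRBA _ _).mp hr⟩
    have hB := bfsB_unreach piecesB cs _ hLB (cs.length + 1) 0 [0] [0] (invB_zero piecesB cs) hno
    cases hv : (dpA piecesA cs (PySem.Set.ofList (piecesA.map List.length)) cs.length).getD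
        cs.length none with
    | some k =>
      rw [hv] at hA
      exact absurd ⟨k, hA.1⟩ hex
    | none =>
      rw [hB]
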